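-- pv_equiv track=rewrite | github.com/toomanytaps/resources | ChecksumQuestions.py | basic_checksum
-- ===== SOURCE A (Python) =====
-- def bin_add_carry(s1, s2):
--     out = [0 for i in s1] # A list of zeroes the same length as s1
--     carry = [0 for i in s1] + [0, 0] # I think two units is the max carry possible. it might be 1 though
--
--     # Reverse s1 and s2 to make addition easier
--     s1_rev = s1[::-1]
--     s2_rev = s2[::-1]
--
--     for i in range(len(s1_rev)):
--         x = int(s1_rev[i]) + int(s2_rev[i]) + int(carry[i])
--
--         if x > 2:
--             carry[i+1] = x - 2
--             out[i] = x % 2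
--         elif x == 2:
--             carry[i+1] = 1
--             out[i] = 0
--         elif x == 1:
--             out[i] = 1
--         elif x == 0:
--             out[i] = 0
--
--     # so now we need to wrap the carry around and add it back in
--     # We take the last two digits of the carry and reverse them and pad that out with zeroes
--     wrap = [0] * (len(s1)-2) + carry[-2:][::-1]
--     wrap = wrap[::-1] # reverse the wrap
--
--     while sum(wrap) > 0:
--         carry = [0 for i in s1] + [0, 0] # reset the carry
--
--         # Add the out and the wrap
--         for i in range(len(out)):
--             x = int(out[i]) + int(wrap[i]) + int(carry[i])
--
--             if x > 2:
--                 carry[i + 1] = x - 2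
--                 out[i] = x % 2
--             elif x == 2:
--                 carry[i + 1] = 1
--                 out[i] = 0
--             elif x == 1:
--                 out[i] = 1
--             elif x == 0:
--                 out[i] = 0
--
--         # Recalc the wrap
--         wrap = [0] * (len(s1) - 2) + carry[-2:][::-1]
--         wrap = wrap[::-1]  # reverse the wrap
--
--     # Convert the output to a string
--     out = ''.join([str(i) for i in out])
--     # reverse the output (because we reversed the input!)
--     out = out[::-1]
--
--     return out
--
-- def basic_checksum(data):
--     out = None
--
--     for byte in data:
--         if not out:
--             out = byte
--         else:
--             out = bin_add_carry(out, byte)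
--
--     return out
-- ===== SOURCE B (Python) =====
-- def basic_checksum(data):
--     out = None
--     bit = {'0': 0, '1': 1}
--
--     for byte in data:
--         if not out:
--             out = byte
--         else:
--             w = len(out)
--             a = 0
--             for ch in out:
--                 a = 2 * a + bit[ch]
--             b = 0
--             for ch in byte[-w:]:
--                 b = 2 * b + bit[ch]
--             t = a + b
--             if t >= 1 << w:
--                 t -= (1 << w) - 1
--             bits = []
--             for _ in range(w):
--                 bits.append('1' if t % 2 else '0')
--                 t //= 2
--             out = ''.join(reversed(bits))
--
--     return out
-- ===== Notes on version B (the rewrite author's own statement) =====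
-- stated objective: simpler
-- what changed: Replaces A's per-digit ripple-carry over zero-initialised out/carry lists plus a wrap-around while-loop with integer arithmetic: convert the operands to ints, add once, apply the end-around carry in closed form (t -= 2**w - 1 when t >= 2**w), and format back to a w-bit string.
-- outside the precondition, e.g. on basic_checksum(['2', '2']): A returns '1', B raises KeyError; on basic_checksum([]): A returns None, B returns None
import Mathlib
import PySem

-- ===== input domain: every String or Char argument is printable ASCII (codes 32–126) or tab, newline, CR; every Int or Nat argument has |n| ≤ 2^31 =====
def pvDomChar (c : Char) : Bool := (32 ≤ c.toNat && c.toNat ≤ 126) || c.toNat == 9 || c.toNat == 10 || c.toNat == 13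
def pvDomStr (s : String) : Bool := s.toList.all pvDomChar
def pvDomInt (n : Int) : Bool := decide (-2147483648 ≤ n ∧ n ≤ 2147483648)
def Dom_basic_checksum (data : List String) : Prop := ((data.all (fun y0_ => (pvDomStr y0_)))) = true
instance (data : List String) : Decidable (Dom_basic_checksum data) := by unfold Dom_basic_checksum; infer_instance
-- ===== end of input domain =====

-- B replaces A's per-digit carry-list addition and wrap while-loop by integer arithmetic with a
-- closed-form end-around carry; proved equal to A on non-degenerate all-binary inputs (objective: simpler).


-- ===== PORT A =====
-- int(ch) on one character; `.getD 0` is only reached where Python raises ValueError (excluded by Pre_)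
def pvCharInt (c : Char) : Int := (PySem.Int.ofChars? [c]).getD 0

-- the `while sum(wrap) > 0` loop of bin_add_carry; fuel is never exhausted on inputs satisfying
-- Pre_ (there the wrap sum reaches 0 after at most one pass)
def pvWhileWrap (fuel : Nat) (n : Nat) (out wrap : List Int) : List Int :=
  match fuel with
  | 0 => out
  | fuel + 1 =>
    if 0 < wrap.sum then
      let oc := (List.range out.length).foldl (fun (oc : List Int × List Int) i =>
        let x := oc.1.getD i 0 + wrap.getD i 0 + oc.2.getD i 0
        if x > 2 then (oc.1.set i (PySem.Int.mod x 2), oc.2.set (i+1) (x - 2))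
        else if x = 2 then (oc.1.set i 0, oc.2.set (i+1) 1)
        else if x = 1 then (oc.1.set i 1, oc.2)
        else if x = 0 then (oc.1.set i 0, oc.2)
        else oc) (out, List.replicate n (0:Int) ++ [0, 0])
      let wrap0 := List.replicate (n - 2) (0:Int) ++
        ((PySem.List.slice? (PySem.List.slice oc.2 (some (-2)) none) none none (-1)).getD [])
      pvWhileWrap fuel n oc.1 ((PySem.List.slice? wrap0 none none (-1)).getD [])
    else out

def bin_add_carry (s1 s2 : String) : String :=
  let out0 : List Int := s1.toList.map (fun _ => 0)
  let carry0 : List Int := s1.toList.map (fun _ => (0:Int)) ++ [0, 0]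
  let s1r := s1.toList.reverse
  let s2r := s2.toList.reverse
  -- s2_rev[i] raises IndexError when i ≥ len(s2); the `.getD` defaults are only reached outside Pre_
  let oc := (List.range s1r.length).foldl (fun (oc : List Int × List Int) i =>
    let x := pvCharInt (s1r.getD i ' ') + pvCharInt (s2r.getD i ' ') + oc.2.getD i 0
    if x > 2 then (oc.1.set i (PySem.Int.mod x 2), oc.2.set (i+1) (x - 2))
    else if x = 2 then (oc.1.set i 0, oc.2.set (i+1) 1)
    else if x = 1 then (oc.1.set i 1, oc.2)
    else if x = 0 then (oc.1.set i 0, oc.2)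
    else oc) (out0, carry0)
  let wrap0 := List.replicate (s1.toList.length - 2) (0:Int) ++
    ((PySem.List.slice? (PySem.List.slice oc.2 (some (-2)) none) none none (-1)).getD [])
  let wrap := (PySem.List.slice? wrap0 none none (-1)).getD []
  let outF := pvWhileWrap (s1.toList.length + 2) s1.toList.length oc.1 wrap
  -- ''.join([str(i) for i in out]) then out[::-1] (reverse)
  String.ofList (((outF.map (fun v => PySem.Int.toChars v)).flatten).reverse)

def basic_checksum (data : List String) : String :=
  -- `.getD ""`: when the loop produces no string Python A returns None, not a str (excluded by Pre_)
  (data.foldl (fun (out : Option String) byte =>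
    match out with
    | none => some byte                                 -- `if not out` (None)
    | some s =>
      if s.toList = [] then some byte                   -- `if not out` (empty string)
      else some (bin_add_carry s byte)) none).getD ""

-- ===== PORT B =====
-- the `bit` lookup table of B ({'0': 0, '1': 1}); bit[ch] raises KeyError outside Pre_
def pvBitDict : PySem.Dict Char Int := PySem.Dict.ofList [('0', 0), ('1', 1)]

def basic_checksum_alt (data : List String) : String :=
  (data.foldl (fun (out : Option String) byte =>
    match out with
    | none => some byte
    | some s =>
      if s.toList = [] then some byte
      else
        let w := s.toList.length
        let a := s.toList.foldl (fun v c => 2 * v + ((PySem.Dict.get? pvBitDict c).getD 0)) 0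
        let b := (PySem.List.slice byte.toList (some (-(w:Int))) none).foldl
                   (fun v c => 2 * v + ((PySem.Dict.get? pvBitDict c).getD 0)) 0
        let t0 := a + b
        let t1 := if (1:Int) <<< w ≤ t0 then t0 - ((1:Int) <<< w - 1) else t0
        let db := (List.range w).foldl (fun (st : List Char × Int) _ =>
            (st.1 ++ [if PySem.Int.mod st.2 2 ≠ 0 then '1' else '0'], PySem.Int.floordiv st.2 2))
            ([], t1)
        some (String.ofList db.1.reverse)) none).getD ""

-- ===== PRECONDITION & SPEC =====
-- data with leading empty strings skipped (Python's `if not out` passes them over)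
def pvTrim (data : List String) : List String := data.dropWhile (fun s => s.toList.isEmpty)

-- Pre_ excludes only inputs on which at least one addition actually happens and goes wrong:
-- the empty list (A returns None, not a str), and lists whose added bytes contain a character
-- other than '0'/'1' (A raises ValueError on non-digits and returns accidental digit-arithmetic
-- values on digits 2-9, neither checksum behaviour) or a later byte shorter than the first
-- non-empty byte (A raises IndexError).
def Pre_basic_checksum (data : List String) : Prop :=
  data ≠ [] ∧
  (pvTrim data = [] ∨ (pvTrim data).tail = [] ∨
    (((pvTrim data).all (fun s => s.toList.all (fun c => c == '0' || c == '1'))) = true ∧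
     ∀ s ∈ pvTrim data, ((pvTrim data).headD "").toList.length ≤ s.toList.length))
instance (data : List String) : Decidable (Pre_basic_checksum data) := by
  unfold Pre_basic_checksum; infer_instance

def pvWitness_basic_checksum : List String := ["101", "011"]

def Spec_basic_checksum (data : List String) (out : String) : Prop := out = basic_checksum_alt data
instance (data : List String) (out : String) : Decidable (Spec_basic_checksum data out) := by
  unfold Spec_basic_checksum; infer_instance

-- ===== CLAIM (what is proved, stated in full; the proofs are below) =====
def Claim_equal_basic_checksum : Prop := ∀ (data : List String), Dom_basic_checksum data →
  Pre_basic_checksum data → Spec_basic_checksum data (basic_checksum data)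

-- ===== LEMMAS AND PROOFS =====

-- char bit value ('1' ↦ 1, everything else 0)
def pvCB (c : Char) : Int := if c = '1' then 1 else 0

def pvBitChar (v : Int) : Char := if v = 1 then '1' else '0'

-- carry chain of the per-digit addition of two bit streams
def pvC (a b : Nat → Int) : Nat → Int
  | 0 => 0
  | i + 1 => if 2 ≤ a i + b i + pvC a b i then 1 else 0

-- output digit of the per-digit addition
def pvO (a b : Nat → Int) (i : Nat) : Int :=
  if a i + b i + pvC a b i = 1 ∨ a i + b i + pvC a b i = 3 then 1 else 0

-- value of the low w digits of a bit stream (LSB first)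
def pvVal (o : Nat → Int) (w : Nat) : Int := ∑ i ∈ Finset.range w, o i * 2 ^ i

def pvBitf (f : Nat → Int) : Prop := ∀ i, f i = 0 ∨ f i = 1

lemma pvC_bit (a b : Nat → Int) : ∀ i, pvC a b i = 0 ∨ pvC a b i = 1 := by
  intro i; cases i with
  | zero => left; rfl
  | succ n => unfold pvC; split <;> simp

lemma pvO_bit (a b : Nat → Int) : pvBitf (pvO a b) := by
  intro i; unfold pvO; split <;> simp

lemma pvVal_congr {f g : Nat → Int} (w : Nat) (h : ∀ i < w, f i = g i) :
    pvVal f w = pvVal g w := by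
  unfold pvVal; exact Finset.sum_congr rfl (fun i hi => by rw [h i (Finset.mem_range.mp hi)])

lemma pvVal_nonneg {f : Nat → Int} (hf : pvBitf f) (w : Nat) : 0 ≤ pvVal f w := by
  unfold pvVal
  refine Finset.sum_nonneg (fun i _ => ?_)
  rcases hf i with h | h <;> rw [h] <;> positivity

lemma pvVal_le {f : Nat → Int} (hf : pvBitf f) (w : Nat) : pvVal f w ≤ 2 ^ w - 1 := by
  induction w with
  | zero => simp [pvVal]
  | succ n ih =>
    have h2 : (0:Int) < 2 ^ n := by positivity
    have hb : f n ≤ 1 := by rcases hf n with h | h <;> omega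
    have : pvVal f (n+1) = pvVal f n + f n * 2 ^ n := by
      unfold pvVal; rw [Finset.sum_range_succ]
    rw [this]
    have : f n * 2 ^ n ≤ 2 ^ n := by nlinarith
    have hpow : (2:Int) ^ (n+1) = 2 * 2 ^ n := by ring
    omega

lemma pvVal_shift (o : Nat → Int) (m : Nat) :
    pvVal o (m + 1) = o 0 + 2 * pvVal (fun j => o (j + 1)) m := by
  unfold pvVal
  rw [Finset.sum_range_succ' (fun i => o i * 2 ^ i) m, Finset.mul_sum]
  simp only [pow_zero, mul_one, pow_succ]
  rw [add_comm]
  congr 1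
  exact Finset.sum_congr rfl (fun i _ => by ring)

lemma pvVal_zero_fn (w : Nat) : pvVal (fun _ => (0:Int)) w = 0 := by simp [pvVal]

-- one's-complement-style correctness of the digit recurrence
lemma pvVal_add (a b : Nat → Int) (ha : pvBitf a) (hb : pvBitf b) (w : Nat) :
    pvVal (pvO a b) w + 2 ^ w * pvC a b w = pvVal a w + pvVal b w := by
  induction w with
  | zero => simp [pvVal, pvC]
  | succ n ih =>
    have key : pvO a b n + 2 * pvC a b (n + 1) = a n + b n + pvC a b n := by
      rcases ha n with h1 | h1 <;> rcases hb n with h2 | h2 <;>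
        rcases pvC_bit a b n with h3 | h3 <;>
        simp [pvO, pvC, h1, h2, h3]
    have e1 : pvVal (pvO a b) (n+1) = pvVal (pvO a b) n + pvO a b n * 2 ^ n := by
      unfold pvVal; rw [Finset.sum_range_succ]
    have e2 : pvVal a (n+1) = pvVal a n + a n * 2 ^ n := by
      unfold pvVal; rw [Finset.sum_range_succ]
    have e3 : pvVal b (n+1) = pvVal b n + b n * 2 ^ n := by
      unfold pvVal; rw [Finset.sum_range_succ]
    rw [e1, e2, e3]
    linear_combination ih + (2:Int) ^ n * key

-- dispatch of the four-way if in one loop step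
lemma pvStepEq (a b : Nat → Int) (ha : pvBitf a) (hb : pvBitf b) (k : Nat)
    (out carry : List Int) (hck : carry.getD k 0 = pvC a b k)
    (hc1 : carry.getD (k+1) 0 = 0) (hlen : k + 1 < carry.length) :
    (if a k + b k + carry.getD k 0 > 2 then
        (out.set k (PySem.Int.mod (a k + b k + carry.getD k 0) 2),
         carry.set (k+1) (a k + b k + carry.getD k 0 - 2))
      else if a k + b k + carry.getD k 0 = 2 then (out.set k 0, carry.set (k+1) 1)
      else if a k + b k + carry.getD k 0 = 1 then (out.set k 1, carry)
      else if a k + b k + carry.getD k 0 = 0 then (out.set k 0, carry)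
      else (out, carry))
    = (out.set k (pvO a b k), carry.set (k+1) (pvC a b (k+1))) := by
  have hid : carry.set (k+1) 0 = carry := by
    have : carry[k+1] = 0 := by
      rw [← List.getD_eq_getElem carry 0 hlen]; exact hc1
    conv_lhs => rw [← this]
    exact List.set_getElem_self hlen
  have hm : PySem.Int.mod (3:Int) 2 = 1 := by decide
  rw [hck]
  rcases ha k with h1 | h1 <;> rcases hb k with h2 | h2 <;>
    rcases pvC_bit a b k with h3 | h3
  all_goals simp only [h1, h2, h3, pvO, pvC]
  all_goals norm_num [hid, hm]


-- variant of pvStepEq whose first addend is read from the out list itself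
lemma pvStepEq2 (a b : Nat → Int) (ha : pvBitf a) (hb : pvBitf b) (k : Nat)
    (out carry : List Int) (hok : out.getD k 0 = a k) (hck : carry.getD k 0 = pvC a b k)
    (hc1 : carry.getD (k+1) 0 = 0) (hlen : k + 1 < carry.length) :
    (if out.getD k 0 + b k + carry.getD k 0 > 2 then
        (out.set k (PySem.Int.mod (out.getD k 0 + b k + carry.getD k 0) 2),
         carry.set (k+1) (out.getD k 0 + b k + carry.getD k 0 - 2))
      else if out.getD k 0 + b k + carry.getD k 0 = 2 then (out.set k 0, carry.set (k+1) 1)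
      else if out.getD k 0 + b k + carry.getD k 0 = 1 then (out.set k 1, carry)
      else if out.getD k 0 + b k + carry.getD k 0 = 0 then (out.set k 0, carry)
      else (out, carry))
    = (out.set k (pvO a b k), carry.set (k+1) (pvC a b (k+1))) := by
  rw [hok]
  exact pvStepEq a b ha hb k out carry hck hc1 hlen

lemma pvSetAt (M L : List Int) (k : Nat) (h : M.length = k) (v : Int) :
    (M ++ L).set k v = M ++ L.set 0 v := by
  subst h; rw [List.set_append]; simp

lemma pvGetDAt (M L : List Int) (k : Nat) (h : M.length = k) :
    (M ++ L).getD k 0 = L.getD 0 0 := by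
  subst h; simp [List.getD_eq_getElem?_getD, List.getElem?_append_right]

lemma pvMapRangeGetD (f : Nat → Int) (k j : Nat) (h : j < k) :
    ((List.range k).map f).getD j 0 = f j := by
  rw [List.getD_eq_getElem _ _ (by simp [h])]; simp

lemma pvReplGetD (n : Nat) (h : 1 ≤ n) : (List.replicate n (0:Int)).getD 0 0 = 0 := by
  cases n with
  | zero => omega
  | succ m => rfl

-- state of the ripple loop carry list after k steps, read at position k
lemma pvCarryRead (a b : Nat → Int) (w k : Nat) (hk : k ≤ w) :
    (0 :: ((List.range k).map (fun i => pvC a b (i+1)) ++ List.replicate (w+1-k) (0:Int))).getD k 0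
      = pvC a b k := by
  cases k with
  | zero => rfl
  | succ j =>
    rw [List.getD_cons_succ, List.getD_append _ _ _ _ (by simp), pvMapRangeGetD _ _ _ (by omega)]

lemma pvCarryReadNext (a b : Nat → Int) (w k : Nat) (hk : k ≤ w) :
    (0 :: ((List.range k).map (fun i => pvC a b (i+1)) ++ List.replicate (w+1-k) (0:Int))).getD (k+1) 0
      = 0 := by
  rw [List.getD_cons_succ, pvGetDAt _ _ k (by simp), pvReplGetD _ (by omega)]

-- the two `set`s of one loop step advance the structured state by one position
lemma pvOutAdvance (o : Nat → Int) (R : List Int) (k : Nat) (hR : R ≠ []) :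
    (((List.range k).map o ++ R).set k (o k)) = (List.range (k+1)).map o ++ R.tail := by
  rw [pvSetAt _ _ k (by simp)]
  cases R with
  | nil => exact absurd rfl hR
  | cons r t => rw [List.set_cons_zero, List.range_succ, List.map_append]; simp

lemma pvCarryAdvance (a b : Nat → Int) (w k : Nat) (hk : k + 1 ≤ w) :
    ((0 : Int) :: ((List.range k).map (fun i => pvC a b (i+1)) ++ List.replicate (w+1-k) (0:Int))).set
        (k+1) (pvC a b (k+1))
      = 0 :: ((List.range (k+1)).map (fun i => pvC a b (i+1)) ++ List.replicate (w+1-(k+1)) (0:Int)) := by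
  rw [List.set_cons_succ, pvSetAt _ _ k (by simp)]
  have h1 : List.replicate (w+1-k) (0:Int) = 0 :: List.replicate (w-k) 0 := by
    rw [← List.replicate_succ]; congr 1; omega
  rw [h1, List.set_cons_zero, List.range_succ, List.map_append]
  simp

-- full characterisation of the first ripple loop
lemma pvLoop1 (a b : Nat → Int) (ha : pvBitf a) (hb : pvBitf b) (w : Nat) :
    ∀ k, k ≤ w →
    (List.range k).foldl (fun (oc : List Int × List Int) i =>
        let x := a i + b i + oc.2.getD i 0
        if x > 2 then (oc.1.set i (PySem.Int.mod x 2), oc.2.set (i+1) (x - 2))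
        else if x = 2 then (oc.1.set i 0, oc.2.set (i+1) 1)
        else if x = 1 then (oc.1.set i 1, oc.2)
        else if x = 0 then (oc.1.set i 0, oc.2)
        else oc) (List.replicate w (0:Int), List.replicate (w+2) (0:Int))
    = ((List.range k).map (pvO a b) ++ List.replicate (w - k) 0,
       0 :: ((List.range k).map (fun i => pvC a b (i+1)) ++ List.replicate (w + 1 - k) 0)) := by
  intro k
  induction k with
  | zero =>
    intro _
    simp [show List.replicate (w+2) (0:Int) = 0 :: List.replicate (w+1) 0 from rfl]
  | succ k ih =>
    intro hk1
    have hk : k ≤ w := by omega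
    rw [List.range_succ, List.foldl_append, ih hk, List.foldl_cons, List.foldl_nil]
    refine Eq.trans (pvStepEq a b ha hb k _ _ (pvCarryRead a b w k hk)
      (pvCarryReadNext a b w k hk) (by simp; omega)) ?_
    rw [pvCarryAdvance a b w k hk1, pvOutAdvance (pvO a b) _ k (by simp; omega)]
    have ht : (List.replicate (w-k) (0:Int)).tail = List.replicate (w-(k+1)) 0 := by
      rw [List.tail_replicate, Nat.sub_sub]
    rw [ht, List.range_succ]

-- full characterisation of the re-add loop (reads its first addend from the evolving out list)
lemma pvLoop2 (b : Nat → Int) (out1 : List Int) (w : Nat) (hlen : out1.length = w)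
    (ha : pvBitf (fun i => out1.getD i 0)) (hb : pvBitf b) :
    ∀ k, k ≤ w →
    (List.range k).foldl (fun (oc : List Int × List Int) i =>
        let x := oc.1.getD i 0 + b i + oc.2.getD i 0
        if x > 2 then (oc.1.set i (PySem.Int.mod x 2), oc.2.set (i+1) (x - 2))
        else if x = 2 then (oc.1.set i 0, oc.2.set (i+1) 1)
        else if x = 1 then (oc.1.set i 1, oc.2)
        else if x = 0 then (oc.1.set i 0, oc.2)
        else oc) (out1, List.replicate (w+2) (0:Int))
    = ((List.range k).map (pvO (fun i => out1.getD i 0) b) ++ out1.drop k,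
       0 :: ((List.range k).map (fun i => pvC (fun i => out1.getD i 0) b (i+1)) ++ List.replicate (w + 1 - k) 0)) := by
  intro k
  induction k with
  | zero =>
    intro _
    simp [show List.replicate (w+2) (0:Int) = 0 :: List.replicate (w+1) 0 from rfl]
  | succ k ih =>
    intro hk1
    have hk : k ≤ w := by omega
    have hkl : k < out1.length := by omega
    rw [List.range_succ, List.foldl_append, ih hk, List.foldl_cons, List.foldl_nil]
    have hread : (((List.range k).map (pvO (fun i => out1.getD i 0) b) ++ out1.drop k)).getD k 0
        = out1.getD k 0 := by
      rw [pvGetDAt _ _ k (by simp), List.drop_eq_getElem_cons hkl, List.getD_cons_zero,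
        List.getD_eq_getElem out1 0 hkl]
    refine Eq.trans (pvStepEq2 (fun i => out1.getD i 0) b ha hb k _ _ hread
      (pvCarryRead _ b w k hk) (pvCarryReadNext _ b w k hk) (by simp; omega)) ?_
    rw [pvCarryAdvance _ b w k hk1, pvOutAdvance (pvO (fun i => out1.getD i 0) b) _ k
      (by rw [List.drop_eq_getElem_cons hkl]; exact List.cons_ne_nil _ _)]
    rw [List.tail_drop, List.range_succ]


lemma pvGetDReplicate (n j : Nat) : (List.replicate n (0:Int)).getD j 0 = 0 := by
  simp [List.getD_eq_getElem?_getD]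

-- how the port computes `wrap` from the structured carry list
lemma pvWrapCompute (f : Nat → Int) (w : Nat) (hw : 1 ≤ w) :
    ((PySem.List.slice? (List.replicate (w - 2) (0:Int) ++
        ((PySem.List.slice? (PySem.List.slice
            (0 :: ((List.range w).map f ++ List.replicate (w + 1 - w) 0)) (some (-2)) none)
          none none (-1)).getD [])) none none (-1)).getD [])
    = f (w-1) :: 0 :: List.replicate (w - 2) 0 := by
  have h1 : w + 1 - w = 1 := by omega
  rw [h1]
  have hw1 : w = (w - 1) + 1 := by omega
  have hsplit : (0:Int) :: ((List.range w).map f ++ List.replicate 1 0)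
      = (0 :: (List.range (w-1)).map f) ++ [f (w-1), 0] := by
    conv_lhs => rw [hw1, List.range_succ, List.map_append]
    simp
  rw [hsplit]
  rw [PySem.List.slice_from_neg_ofNat _ 2 (by omega)]
  have hlen : ((0 :: (List.range (w-1)).map f) ++ [f (w-1), 0]).length - 2
      = (0 :: (List.range (w-1)).map f).length := by simp
  rw [hlen, List.drop_left]
  rw [PySem.List.slice?_none_none_neg_one]
  simp only [Option.getD_some]
  rw [PySem.List.slice?_none_none_neg_one]
  simp

lemma pvWhile_exit (fuel n : Nat) (out wrap : List Int) (h : ¬ 0 < wrap.sum) :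
    pvWhileWrap (fuel+1) n out wrap = out := by
  simp [pvWhileWrap, h]

lemma pvWhile_enter (fuel n : Nat) (out wrap : List Int) (h : 0 < wrap.sum) :
    pvWhileWrap (fuel+1) n out wrap =
      pvWhileWrap fuel n
        ((List.range out.length).foldl (fun (oc : List Int × List Int) i =>
          let x := oc.1.getD i 0 + wrap.getD i 0 + oc.2.getD i 0
          if x > 2 then (oc.1.set i (PySem.Int.mod x 2), oc.2.set (i+1) (x - 2))
          else if x = 2 then (oc.1.set i 0, oc.2.set (i+1) 1)
          else if x = 1 then (oc.1.set i 1, oc.2)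
          else if x = 0 then (oc.1.set i 0, oc.2)
          else oc) (out, List.replicate n (0:Int) ++ [0, 0])).1
        ((PySem.List.slice? (List.replicate (n - 2) (0:Int) ++
          ((PySem.List.slice? (PySem.List.slice
              ((List.range out.length).foldl (fun (oc : List Int × List Int) i =>
                let x := oc.1.getD i 0 + wrap.getD i 0 + oc.2.getD i 0
                if x > 2 then (oc.1.set i (PySem.Int.mod x 2), oc.2.set (i+1) (x - 2))
                else if x = 2 then (oc.1.set i 0, oc.2.set (i+1) 1)
                else if x = 1 then (oc.1.set i 1, oc.2)
                else if x = 0 then (oc.1.set i 0, oc.2)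
                else oc) (out, List.replicate n (0:Int) ++ [0, 0])).2
              (some (-2)) none) none none (-1)).getD [])) none none (-1)).getD []) := by
  rw [pvWhileWrap]
  simp only [if_pos h]

lemma pvReplPlusTwo (w : Nat) : List.replicate w (0:Int) ++ [0, 0] = List.replicate (w+2) 0 := by
  rw [List.replicate_add]
  rfl

-- the port's first ripple loop, in the exact shape it occurs in bin_add_carry
lemma pvLoop1' (u v L : List Char) (w : Nat) (hu : u.length = w) (hL : L.length = w)
    (ha : pvBitf (fun i => pvCharInt (u.getD i ' ')))
    (hb : pvBitf (fun i => pvCharInt (v.getD i ' '))) :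
    (List.range u.length).foldl (fun (oc : List Int × List Int) i =>
        let x := pvCharInt (u.getD i ' ') + pvCharInt (v.getD i ' ') + oc.2.getD i 0
        if x > 2 then (oc.1.set i (PySem.Int.mod x 2), oc.2.set (i+1) (x - 2))
        else if x = 2 then (oc.1.set i 0, oc.2.set (i+1) 1)
        else if x = 1 then (oc.1.set i 1, oc.2)
        else if x = 0 then (oc.1.set i 0, oc.2)
        else oc) (L.map (fun _ => (0:Int)), L.map (fun _ => (0:Int)) ++ [0, 0])
    = ((List.range w).map (pvO (fun i => pvCharInt (u.getD i ' ')) (fun i => pvCharInt (v.getD i ' '))) ++ List.replicate (w - w) 0,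
       0 :: ((List.range w).map (fun i => pvC (fun i => pvCharInt (u.getD i ' ')) (fun i => pvCharInt (v.getD i ' ')) (i+1)) ++ List.replicate (w + 1 - w) 0)) := by
  rw [hu, List.map_const', hL, pvReplPlusTwo]
  exact pvLoop1 _ _ ha hb w w le_rfl

-- the port's re-add loop, in the exact shape it occurs in pvWhileWrap
lemma pvLoop2' (W : List Int) (out1 : List Int) (w : Nat) (hlen : out1.length = w)
    (ha : pvBitf (fun i => out1.getD i 0)) (hb : pvBitf (fun i => W.getD i 0)) :
    (List.range out1.length).foldl (fun (oc : List Int × List Int) i =>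
        let x := oc.1.getD i 0 + W.getD i 0 + oc.2.getD i 0
        if x > 2 then (oc.1.set i (PySem.Int.mod x 2), oc.2.set (i+1) (x - 2))
        else if x = 2 then (oc.1.set i 0, oc.2.set (i+1) 1)
        else if x = 1 then (oc.1.set i 1, oc.2)
        else if x = 0 then (oc.1.set i 0, oc.2)
        else oc) (out1, List.replicate w (0:Int) ++ [0, 0])
    = ((List.range w).map (pvO (fun i => out1.getD i 0) (fun i => W.getD i 0)) ++ out1.drop w,
       0 :: ((List.range w).map (fun i => pvC (fun i => out1.getD i 0) (fun i => W.getD i 0) (i+1)) ++ List.replicate (w + 1 - w) 0)) := by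
  rw [hlen, pvReplPlusTwo]
  exact pvLoop2 _ out1 w hlen ha hb w le_rfl

-- B's MSB-first parse loop computes the bit value
lemma pvParse (cs : List Char) : ∀ v0 : Int,
    cs.foldl (fun v c => 2 * v + (if c = '1' then (1:Int) else 0)) v0
    = v0 * 2 ^ cs.length + pvVal (fun j => pvCB (cs.reverse.getD j ' ')) cs.length := by
  induction cs with
  | nil => intro v0; simp [pvVal]
  | cons c t ih =>
    intro v0
    rw [List.foldl_cons, ih]
    have hlast : (t.reverse ++ [c]).getD t.reverse.length ' ' = c := by
      simp [List.getD_eq_getElem?_getD]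
    have hmid : ∀ j < t.length, (t.reverse ++ [c]).getD j ' ' = t.reverse.getD j ' ' := by
      intro j hj
      exact List.getD_append _ _ _ _ (by simpa using hj)
    have hval : pvVal (fun j => pvCB ((c :: t).reverse.getD j ' ')) (c :: t).length
        = pvVal (fun j => pvCB (t.reverse.getD j ' ')) t.length + pvCB c * 2 ^ t.length := by
      simp only [List.reverse_cons, List.length_cons]
      unfold pvVal
      rw [Finset.sum_range_succ]
      have h1 : (t.reverse ++ [c]).getD t.length ' ' = c := by
        simp [List.getD_eq_getElem?_getD]
      simp only [h1]
      congr 1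
      exact Finset.sum_congr rfl (fun j hj => by
        simp only [hmid j (Finset.mem_range.mp hj)])
    rw [hval]
    simp only [List.length_cons]
    have : pvCB c = if c = '1' then (1:Int) else 0 := rfl
    rw [← this]
    ring

-- B's digit-emission loop produces the bit characters of the value
lemma pvDigits (o : Nat → Int) (ho : pvBitf o) (w : Nat) :
    ∀ k, k ≤ w →
    (List.range k).foldl (fun (st : List Char × Int) _ =>
        (st.1 ++ [if PySem.Int.mod st.2 2 ≠ 0 then '1' else '0'], PySem.Int.floordiv st.2 2))
      ([], pvVal o w)
    = ((List.range k).map (fun j => pvBitChar (o j)), pvVal (fun j => o (j + k)) (w - k)) := by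
  intro k
  induction k with
  | zero => intro _; simp
  | succ k ih =>
    intro hk1
    have hk : k ≤ w := by omega
    rw [List.range_succ, List.foldl_append, ih hk, List.foldl_cons, List.foldl_nil]
    have hshift : pvVal (fun j => o (j + k)) (w - k)
        = o k + 2 * pvVal (fun j => o (j + (k+1))) (w - (k+1)) := by
      have hwk : w - k = (w - (k+1)) + 1 := by omega
      rw [hwk, pvVal_shift]
      have h0 : o (0 + k) = o k := by rw [Nat.zero_add]
      simp only [h0]
      congr 2
      exact pvVal_congr _ (fun j _ => by congr 1; omega)
    have hnn : 0 ≤ pvVal (fun j => o (j + (k+1))) (w - (k+1)) :=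
      pvVal_nonneg (fun i => ho (i + (k+1))) _
    have hmod : PySem.Int.mod (pvVal (fun j => o (j + k)) (w - k)) 2 = o k := by
      rw [hshift, PySem.Int.mod_eq_emod_of_pos (by norm_num)]
      rcases ho k with h | h <;> omega
    have hdiv : PySem.Int.floordiv (pvVal (fun j => o (j + k)) (w - k)) 2
        = pvVal (fun j => o (j + (k+1))) (w - (k+1)) := by
      rw [hshift, PySem.Int.floordiv_eq_ediv_of_pos (by norm_num)]
      rcases ho k with h | h <;> omega
    simp only [hmod, hdiv]
    have hchar : (if o k ≠ 0 then '1' else '0') = pvBitChar (o k) := by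
      rcases ho k with h | h <;> simp [h, pvBitChar]
    rw [hchar]
    simp

-- str(d) of a bit list element, joined, is the bit characters
lemma pvFlattenBits (l : List Int) (h : ∀ v ∈ l, v = 0 ∨ v = 1) :
    (l.map (fun v => PySem.Int.toChars v)).flatten = l.map pvBitChar := by
  induction l with
  | nil => simp
  | cons v t ih =>
    simp only [List.map_cons, List.flatten_cons]
    rw [ih (fun x hx => h x (List.mem_cons_of_mem v hx))]
    rcases h v (List.mem_cons_self) with hv | hv <;> subst hv
    · rw [show PySem.Int.toChars 0 = ['0'] from by decide]; rfl
    · rw [show PySem.Int.toChars 1 = ['1'] from by decide]; rfl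

lemma pvCB_bit (c : Char) : pvCB c = 0 ∨ pvCB c = 1 := by
  unfold pvCB; split <;> simp

-- on all-binary strings int(ch) agrees with the bit value of the character
lemma pvCharIntCB (s : List Char) (h : ∀ c ∈ s, c = '0' ∨ c = '1') :
    (fun i => pvCharInt (s.reverse.getD i ' ')) = (fun i => pvCB (s.reverse.getD i ' ')) := by
  funext i
  by_cases hi : i < s.reverse.length
  · have hmem : s.reverse.getD i ' ' ∈ s.reverse := by
      rw [List.getD_eq_getElem _ _ hi]
      exact List.getElem_mem hi
    rcases h _ (List.mem_reverse.mp hmem) with hc | hc <;> rw [hc] <;> decide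
  · rw [List.getD_eq_default _ _ (by omega)]
    decide


-- the dict lookup bit[ch] (with its KeyError default) is the bit value of the character
lemma pvDictBit : (fun (v : Int) (c : Char) => 2 * v + ((PySem.Dict.get? pvBitDict c).getD 0))
    = (fun (v : Int) (c : Char) => 2 * v + (if c = '1' then (1:Int) else 0)) := by
  funext v c
  congr 1
  by_cases h0 : c = '0'
  · subst h0; decide
  · by_cases h1 : c = '1'
    · subst h1; decide
    · rw [if_neg h1]
      simp only [PySem.Dict.get?]
      rw [show pvBitDict.items = [('0', (0:Int)), ('1', 1)] from by decide]
      have e0 : ('0' == c) = false := beq_eq_false_iff_ne.mpr (Ne.symm h0)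
      have e1 : ('1' == c) = false := beq_eq_false_iff_ne.mpr (Ne.symm h1)
      simp [e0, e1]

-- one addition step: A's bin_add_carry equals B's integer-arithmetic block, and both
-- produce the reversed bit characters of a single bit stream o of width len(s)
lemma pvMainStep (s byte : String)
    (hsb : ∀ c ∈ s.toList, c = '0' ∨ c = '1')
    (hbb : ∀ c ∈ byte.toList, c = '0' ∨ c = '1')
    (hw : 1 ≤ s.toList.length)
    (hl : s.toList.length ≤ byte.toList.length) :
    ∃ o : Nat → Int, pvBitf o ∧
      bin_add_carry s byte
        = String.ofList (((List.range s.toList.length).map (fun j => pvBitChar (o j))).reverse) ∧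
      (let w := s.toList.length
       let a := s.toList.foldl (fun v c => 2 * v + ((PySem.Dict.get? pvBitDict c).getD 0)) 0
       let b := (PySem.List.slice byte.toList (some (-(w:Int))) none).foldl
                  (fun v c => 2 * v + ((PySem.Dict.get? pvBitDict c).getD 0)) 0
       let t0 := a + b
       let t1 := if (1:Int) <<< w ≤ t0 then t0 - ((1:Int) <<< w - 1) else t0
       let db := (List.range w).foldl (fun (st : List Char × Int) _ =>
           (st.1 ++ [if PySem.Int.mod st.2 2 ≠ 0 then '1' else '0'], PySem.Int.floordiv st.2 2))
           ([], t1)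
       String.ofList db.1.reverse)
        = String.ofList (((List.range s.toList.length).map (fun j => pvBitChar (o j))).reverse) := by
  have hfs := pvCharIntCB s.toList hsb
  have hfb := pvCharIntCB byte.toList hbb
  have hbaP : pvBitf (fun i => pvCharInt (s.toList.reverse.getD i ' ')) := by
    rw [hfs]; exact fun i => pvCB_bit _
  have hbbP : pvBitf (fun i => pvCharInt (byte.toList.reverse.getD i ' ')) := by
    rw [hfb]; exact fun i => pvCB_bit _
  have hbin : bin_add_carry s byte = String.ofList
      (((pvWhileWrap (s.toList.length + 2) s.toList.length
          ((List.range s.toList.reverse.length).foldl (fun (oc : List Int × List Int) i =>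
            let x := pvCharInt (s.toList.reverse.getD i ' ') + pvCharInt (byte.toList.reverse.getD i ' ') + oc.2.getD i 0
            if x > 2 then (oc.1.set i (PySem.Int.mod x 2), oc.2.set (i+1) (x - 2))
            else if x = 2 then (oc.1.set i 0, oc.2.set (i+1) 1)
            else if x = 1 then (oc.1.set i 1, oc.2)
            else if x = 0 then (oc.1.set i 0, oc.2)
            else oc) (s.toList.map (fun _ => (0:Int)), s.toList.map (fun _ => (0:Int)) ++ [0, 0])).1
          ((PySem.List.slice? (List.replicate (s.toList.length - 2) (0:Int) ++
             ((PySem.List.slice? (PySem.List.slice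
                 ((List.range s.toList.reverse.length).foldl (fun (oc : List Int × List Int) i =>
                   let x := pvCharInt (s.toList.reverse.getD i ' ') + pvCharInt (byte.toList.reverse.getD i ' ') + oc.2.getD i 0
                   if x > 2 then (oc.1.set i (PySem.Int.mod x 2), oc.2.set (i+1) (x - 2))
                   else if x = 2 then (oc.1.set i 0, oc.2.set (i+1) 1)
                   else if x = 1 then (oc.1.set i 1, oc.2)
                   else if x = 0 then (oc.1.set i 0, oc.2)
                   else oc) (s.toList.map (fun _ => (0:Int)), s.toList.map (fun _ => (0:Int)) ++ [0, 0])).2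
                 (some (-2)) none) none none (-1)).getD [])) none none (-1)).getD [])).map
        (fun v => PySem.Int.toChars v)).flatten.reverse) := rfl
  rw [pvLoop1' s.toList.reverse byte.toList.reverse s.toList s.toList.length
      (by simp) rfl hbaP hbbP] at hbin
  rw [pvWrapCompute _ s.toList.length hw] at hbin
  simp only [Nat.sub_self, List.replicate_zero, List.append_nil] at hbin
  rw [show s.toList.length - 1 + 1 = s.toList.length from by omega] at hbin
  rw [hfs, hfb] at hbin
  set w := s.toList.length with hwset
  set A := (fun i => pvCB (s.toList.reverse.getD i ' ')) with hAset
  set B := (fun i => pvCB (byte.toList.reverse.getD i ' ')) with hBset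
  set O1 := (List.range w).map (pvO A B) with hO1set
  have hbitA : pvBitf A := by intro i; simp only [hAset]; exact pvCB_bit _
  have hbitB : pvBitf B := by intro i; simp only [hBset]; exact pvCB_bit _
  have hO1len : O1.length = w := by rw [hO1set]; simp
  have hO1bit : pvBitf (fun i => O1.getD i 0) := by
    intro i
    show O1.getD i 0 = 0 ∨ O1.getD i 0 = 1
    by_cases hi : i < w
    · rw [hO1set, pvMapRangeGetD _ _ _ hi]; exact pvO_bit A B i
    · rw [List.getD_eq_default _ _ (by rw [hO1len]; omega)]; left; rfl
  have h2w : (0:Int) < 2 ^ w := by positivity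
  have hvadd := pvVal_add A B hbitA hbitB w
  have hAle := pvVal_le hbitA w
  have hBle := pvVal_le hbitB w
  have hOle := pvVal_le (pvO_bit A B) w
  have hOnn := pvVal_nonneg (pvO_bit A B) w
  have hshift : (1:Int) <<< w = 2 ^ w := by simp [Int.shiftLeft_eq]
  -- B-side parse values
  have hparse1 : s.toList.foldl (fun v c => 2 * v + (if c = '1' then (1:Int) else 0)) 0
      = pvVal A w := by
    rw [pvParse s.toList 0]
    simp only [zero_mul, zero_add]
    rfl
  have hslice : PySem.List.slice byte.toList (some (-(w:Int))) none
      = byte.toList.drop (byte.toList.length - w) :=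
    PySem.List.slice_from_neg_natCast byte.toList w (by omega)
  have hdroplen : (byte.toList.drop (byte.toList.length - w)).length = w := by
    rw [List.length_drop]; omega
  have hparse2 : (byte.toList.drop (byte.toList.length - w)).foldl
        (fun v c => 2 * v + (if c = '1' then (1:Int) else 0)) 0
      = pvVal B w := by
    rw [pvParse _ 0]
    simp only [zero_mul, zero_add]
    rw [hdroplen]
    refine pvVal_congr _ (fun j hj => ?_)
    have hrev : (byte.toList.drop (byte.toList.length - w)).reverse
        = byte.toList.reverse.take (byte.toList.length - (byte.toList.length - w)) :=
      List.reverse_drop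
    have hww : byte.toList.length - (byte.toList.length - w) = w := by omega
    rw [hrev, hww]
    have : (byte.toList.reverse.take w).getD j ' ' = byte.toList.reverse.getD j ' ' := by
      simp [List.getD_eq_getElem?_getD, List.getElem?_take_of_lt hj]
    rw [this]
  rcases pvC_bit A B w with hc | hc
  · -- no end-around carry
    rw [hc] at hbin
    rw [show pvWhileWrap (w + 2) w O1 ((0:Int) :: 0 :: List.replicate (w - 2) 0) = O1 from
      pvWhile_exit (w+1) w O1 _ (by simp)] at hbin
    rw [pvFlattenBits O1 (by
      intro v hv
      rw [hO1set] at hv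
      obtain ⟨j, _, rfl⟩ := List.mem_map.mp hv
      exact pvO_bit A B j), hO1set, List.map_map] at hbin
    refine ⟨pvO A B, pvO_bit A B, hbin, ?_⟩
    show String.ofList (((List.range w).foldl (fun (st : List Char × Int) _ =>
        (st.1 ++ [if PySem.Int.mod st.2 2 ≠ 0 then '1' else '0'], PySem.Int.floordiv st.2 2))
        ([], if (1:Int) <<< w ≤
              s.toList.foldl (fun v c => 2 * v + ((PySem.Dict.get? pvBitDict c).getD 0)) 0 +
              (PySem.List.slice byte.toList (some (-(w:Int))) none).foldl
                (fun v c => 2 * v + ((PySem.Dict.get? pvBitDict c).getD 0)) 0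
          then s.toList.foldl (fun v c => 2 * v + ((PySem.Dict.get? pvBitDict c).getD 0)) 0 +
              (PySem.List.slice byte.toList (some (-(w:Int))) none).foldl
                (fun v c => 2 * v + ((PySem.Dict.get? pvBitDict c).getD 0)) 0 - ((1:Int) <<< w - 1)
          else s.toList.foldl (fun v c => 2 * v + ((PySem.Dict.get? pvBitDict c).getD 0)) 0 +
              (PySem.List.slice byte.toList (some (-(w:Int))) none).foldl
                (fun v c => 2 * v + ((PySem.Dict.get? pvBitDict c).getD 0)) 0)).1.reverse)
      = String.ofList (((List.range w).map (fun j => pvBitChar (pvO A B j))).reverse)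
    rw [pvDictBit, hslice, hparse1, hparse2, hshift]
    rw [hc, mul_zero, add_zero] at hvadd
    rw [if_neg (not_le.mpr (by linarith))]
    rw [← hvadd]
    rw [pvDigits (pvO A B) (pvO_bit A B) w w le_rfl]
  · -- end-around carry: one extra pass of the while loop
    rw [hc, mul_one] at hvadd
    rw [hc] at hbin
    rw [show pvWhileWrap (w + 2) w O1 ((1:Int) :: 0 :: List.replicate (w - 2) 0)
        = pvWhileWrap (w+1) w
          ((List.range O1.length).foldl (fun (oc : List Int × List Int) i =>
            let x := oc.1.getD i 0 + ((1:Int) :: 0 :: List.replicate (w - 2) 0).getD i 0 + oc.2.getD i 0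
            if x > 2 then (oc.1.set i (PySem.Int.mod x 2), oc.2.set (i+1) (x - 2))
            else if x = 2 then (oc.1.set i 0, oc.2.set (i+1) 1)
            else if x = 1 then (oc.1.set i 1, oc.2)
            else if x = 0 then (oc.1.set i 0, oc.2)
            else oc) (O1, List.replicate w (0:Int) ++ [0, 0])).1
          ((PySem.List.slice? (List.replicate (w - 2) (0:Int) ++
            ((PySem.List.slice? (PySem.List.slice
                ((List.range O1.length).foldl (fun (oc : List Int × List Int) i =>
                  let x := oc.1.getD i 0 + ((1:Int) :: 0 :: List.replicate (w - 2) 0).getD i 0 + oc.2.getD i 0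
                  if x > 2 then (oc.1.set i (PySem.Int.mod x 2), oc.2.set (i+1) (x - 2))
                  else if x = 2 then (oc.1.set i 0, oc.2.set (i+1) 1)
                  else if x = 1 then (oc.1.set i 1, oc.2)
                  else if x = 0 then (oc.1.set i 0, oc.2)
                  else oc) (O1, List.replicate w (0:Int) ++ [0, 0])).2
                (some (-2)) none) none none (-1)).getD [])) none none (-1)).getD []) from
      pvWhile_enter (w+1) w O1 _ (by simp)] at hbin
    have hb2 : pvBitf (fun i => ((1:Int) :: 0 :: List.replicate (w - 2) 0).getD i 0) := by
      intro i
      show ((1:Int) :: 0 :: List.replicate (w - 2) 0).getD i 0 = 0 ∨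
        ((1:Int) :: 0 :: List.replicate (w - 2) 0).getD i 0 = 1
      match i with
      | 0 => right; rfl
      | 1 => left; rfl
      | (j+2) =>
        simp only [List.getD_cons_succ]
        left; exact pvGetDReplicate _ _
    rw [pvLoop2' ((1:Int) :: 0 :: List.replicate (w - 2) 0) O1 w hO1len hO1bit hb2] at hbin
    rw [show O1.drop w = [] from by rw [← hO1len]; exact List.drop_length, List.append_nil] at hbin
    rw [pvWrapCompute _ w hw] at hbin
    rw [show w - 1 + 1 = w from by omega] at hbin
    set A2 := (fun i => O1.getD i 0) with hA2set
    set B2 := (fun i => ((1:Int) :: 0 :: List.replicate (w - 2) 0).getD i 0) with hB2set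
    have hA2val : pvVal A2 w = pvVal (pvO A B) w := by
      refine pvVal_congr _ (fun i hi => ?_)
      show O1.getD i 0 = pvO A B i
      rw [hO1set, pvMapRangeGetD _ _ _ hi]
    have hB2val : pvVal B2 w = 1 := by
      rw [show w = (w-1)+1 from by omega, pvVal_shift]
      have h0 : B2 0 = 1 := rfl
      have hz : pvVal (fun j => B2 (j + 1)) (w - 1) = 0 := by
        rw [show (0:Int) = pvVal (fun _ => (0:Int)) (w-1) from (pvVal_zero_fn _).symm]
        refine pvVal_congr _ (fun j hj => ?_)
        show ((1:Int) :: 0 :: List.replicate (w - 2) 0).getD (j + 1) 0 = 0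
        match j with
        | 0 => rfl
        | (m+1) =>
          simp only [List.getD_cons_succ]
          exact pvGetDReplicate _ _
      rw [h0, hz]
      norm_num
    have hvadd2 := pvVal_add A2 B2 hO1bit hb2 w
    rw [hA2val, hB2val] at hvadd2
    have hO2nn := pvVal_nonneg (pvO_bit A2 B2) w
    have hc2 : pvC A2 B2 w = 0 := by
      rcases pvC_bit A2 B2 w with h | h
      · exact h
      · exfalso; rw [h, mul_one] at hvadd2; linarith
    rw [hc2, mul_zero, add_zero] at hvadd2
    rw [hc2] at hbin
    rw [show pvWhileWrap (w+1) w ((List.range w).map (pvO A2 B2))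
        ((0:Int) :: 0 :: List.replicate (w - 2) 0) = (List.range w).map (pvO A2 B2) from
      pvWhile_exit w w _ _ (by simp)] at hbin
    rw [pvFlattenBits _ (by
      intro v hv
      obtain ⟨j, _, rfl⟩ := List.mem_map.mp hv
      exact pvO_bit A2 B2 j), List.map_map] at hbin
    refine ⟨pvO A2 B2, pvO_bit A2 B2, hbin, ?_⟩
    show String.ofList (((List.range w).foldl (fun (st : List Char × Int) _ =>
        (st.1 ++ [if PySem.Int.mod st.2 2 ≠ 0 then '1' else '0'], PySem.Int.floordiv st.2 2))
        ([], if (1:Int) <<< w ≤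
              s.toList.foldl (fun v c => 2 * v + ((PySem.Dict.get? pvBitDict c).getD 0)) 0 +
              (PySem.List.slice byte.toList (some (-(w:Int))) none).foldl
                (fun v c => 2 * v + ((PySem.Dict.get? pvBitDict c).getD 0)) 0
          then s.toList.foldl (fun v c => 2 * v + ((PySem.Dict.get? pvBitDict c).getD 0)) 0 +
              (PySem.List.slice byte.toList (some (-(w:Int))) none).foldl
                (fun v c => 2 * v + ((PySem.Dict.get? pvBitDict c).getD 0)) 0 - ((1:Int) <<< w - 1)
          else s.toList.foldl (fun v c => 2 * v + ((PySem.Dict.get? pvBitDict c).getD 0)) 0 +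
              (PySem.List.slice byte.toList (some (-(w:Int))) none).foldl
                (fun v c => 2 * v + ((PySem.Dict.get? pvBitDict c).getD 0)) 0)).1.reverse)
      = String.ofList (((List.range w).map (fun j => pvBitChar (pvO A2 B2 j))).reverse)
    rw [pvDictBit, hslice, hparse1, hparse2, hshift]
    rw [if_pos (by linarith)]
    rw [show pvVal A w + pvVal B w - (2 ^ w - 1) = pvVal (pvO A2 B2) w from by linarith]
    rw [pvDigits (pvO A2 B2) (pvO_bit A2 B2) w w le_rfl]


-- the two folds agree from any non-empty all-binary accumulator onward
lemma pvFoldEq (rest : List String) : ∀ (acc : String),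
    (∀ c ∈ acc.toList, c = '0' ∨ c = '1') → 1 ≤ acc.toList.length →
    (∀ b ∈ rest, (∀ c ∈ b.toList, c = '0' ∨ c = '1') ∧ acc.toList.length ≤ b.toList.length) →
    rest.foldl (fun (out : Option String) byte =>
      match out with
      | none => some byte
      | some s =>
        if s.toList = [] then some byte
        else some (bin_add_carry s byte)) (some acc)
    = rest.foldl (fun (out : Option String) byte =>
      match out with
      | none => some byte
      | some s =>
        if s.toList = [] then some byte
        else
          let w := s.toList.length
          let a := s.toList.foldl (fun v c => 2 * v + ((PySem.Dict.get? pvBitDict c).getD 0)) 0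
          let b := (PySem.List.slice byte.toList (some (-(w:Int))) none).foldl
                     (fun v c => 2 * v + ((PySem.Dict.get? pvBitDict c).getD 0)) 0
          let t0 := a + b
          let t1 := if (1:Int) <<< w ≤ t0 then t0 - ((1:Int) <<< w - 1) else t0
          let db := (List.range w).foldl (fun (st : List Char × Int) _ =>
              (st.1 ++ [if PySem.Int.mod st.2 2 ≠ 0 then '1' else '0'], PySem.Int.floordiv st.2 2))
              ([], t1)
          some (String.ofList db.1.reverse)) (some acc) := by
  induction rest with
  | nil => intro acc _ _ _; simp only [List.foldl_nil]
  | cons b t ih =>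
    intro acc hacc hlen hrest
    have hne : ¬ (acc.toList = []) := by
      intro h; rw [h] at hlen; simp at hlen
    obtain ⟨o, hob, hA, hB⟩ := pvMainStep acc b hacc (hrest b List.mem_cons_self).1
      hlen (hrest b List.mem_cons_self).2
    simp only [List.foldl_cons]
    simp only [if_neg hne]
    rw [hA, hB]
    refine ih _ ?_ ?_ ?_
    · intro c hc
      rw [String.toList_ofList] at hc
      obtain ⟨j, _, rfl⟩ := List.mem_map.mp (List.mem_reverse.mp hc)
      rcases hob j with h | h <;> simp [pvBitChar, h]
    · rw [String.toList_ofList]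
      simp only [List.length_reverse, List.length_map, List.length_range]
      exact hlen
    · intro b' hb'
      refine ⟨(hrest b' (List.mem_cons_of_mem b hb')).1, ?_⟩
      rw [String.toList_ofList]
      simp only [List.length_reverse, List.length_map, List.length_range]
      exact (hrest b' (List.mem_cons_of_mem b hb')).2

-- all-empty data: both folds pass every (empty) byte through, so the ports agree
lemma pvAllEmpty (data : List String) (h : ∀ s ∈ data, s.toList = []) :
    basic_checksum data = basic_checksum_alt data := by
  induction data with
  | nil =>
    unfold basic_checksum basic_checksum_alt
    simp only [List.foldl_nil]
  | cons d t ih =>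
    have hd : d.toList = [] := h d List.mem_cons_self
    have ht : ∀ s ∈ t, s.toList = [] := fun s hs => h s (List.mem_cons_of_mem d hs)
    cases t with
    | nil =>
      unfold basic_checksum basic_checksum_alt
      simp only [List.foldl_cons, List.foldl_nil]
    | cons b t' =>
      have hb : b.toList = [] := ht b List.mem_cons_self
      have hA : basic_checksum (d :: b :: t') = basic_checksum (b :: t') := by
        unfold basic_checksum
        simp only [List.foldl_cons]
        congr 2
        show (if d.toList = [] then some b else some (bin_add_carry d b)) = some b
        rw [if_pos hd]
      have hB : basic_checksum_alt (d :: b :: t') = basic_checksum_alt (b :: t') := by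
        unfold basic_checksum_alt
        simp only [List.foldl_cons]
        congr 2
        show (if d.toList = [] then some b else _) = some b
        rw [if_pos hd]
      rw [hA, hB]
      exact ih ht

-- equality of the two ports on every input whose non-empty part does real additions
lemma pvTop (data : List String) (h2 : pvTrim data ≠ [])
    (hcase : (pvTrim data).tail = [] ∨
      ((∀ s ∈ pvTrim data, ∀ c ∈ s.toList, c = '0' ∨ c = '1') ∧
       ∀ s ∈ pvTrim data, ((pvTrim data).headD "").toList.length ≤ s.toList.length)) :
    basic_checksum data = basic_checksum_alt data := by
  induction data with
  | nil => exact absurd rfl h2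
  | cons d t ih =>
    by_cases hd : d.toList.isEmpty = true
    · have htr : pvTrim (d :: t) = pvTrim t := by
        simp [pvTrim, hd]
      rw [htr] at h2 hcase
      cases t with
      | nil => exact absurd rfl h2
      | cons b t' =>
        have hdl : d.toList = [] := List.isEmpty_iff.mp hd
        have hA : basic_checksum (d :: b :: t') = basic_checksum (b :: t') := by
          unfold basic_checksum
          simp only [List.foldl_cons]
          congr 2
          show (if d.toList = [] then some b else some (bin_add_carry d b)) = some b
          rw [if_pos hdl]
        have hB : basic_checksum_alt (d :: b :: t') = basic_checksum_alt (b :: t') := by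
          unfold basic_checksum_alt
          simp only [List.foldl_cons]
          congr 2
          show (if d.toList = [] then some b else _) = some b
          rw [if_pos hdl]
        rw [hA, hB]
        exact ih h2 hcase
    · have htr : pvTrim (d :: t) = d :: t := by
        simp [pvTrim, hd]
      rw [htr] at hcase
      rcases hcase with htail | ⟨h1, h3⟩
      · have ht : t = [] := by simpa using htail
        subst ht
        unfold basic_checksum basic_checksum_alt
        simp only [List.foldl_cons, List.foldl_nil]
      · have hw : 1 ≤ d.toList.length := by
          cases hL : d.toList with
          | nil => rw [hL] at hd; simp at hd
          | cons c cs => simp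
        have hfold := pvFoldEq t d (h1 d List.mem_cons_self) hw (fun x hx =>
          ⟨h1 x (List.mem_cons_of_mem d hx), h3 x (List.mem_cons_of_mem d hx)⟩)
        unfold basic_checksum basic_checksum_alt
        simp only [List.foldl_cons]
        rw [hfold]

-- ===== VERDICT (by name: the statement is the Claim_ definition above) =====
theorem basic_checksum_spec : Claim_equal_basic_checksum := by
  intro data _ hpre
  obtain ⟨hne, hcase⟩ := hpre
  show basic_checksum data = basic_checksum_alt data
  by_cases htrim : pvTrim data = []
  · refine pvAllEmpty data (fun x hx => ?_)
    have hx' := List.dropWhile_eq_nil_iff.mp htrim x hx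
    exact List.isEmpty_iff.mp (by simpa using hx')
  · refine pvTop data htrim ?_
    rcases hcase with h | h | ⟨hb, hlen⟩
    · exact absurd h htrim
    · exact Or.inl h
    · refine Or.inr ⟨?_, hlen⟩
      intro t ht c hc
      have hx := List.all_eq_true.mp (List.all_eq_true.mp hb t ht) c hc
      simpa using hx
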